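-- pv_equiv track=rewrite | github.com/Omer100234/DrafTable | data_collection/clean_stats.py | get_stat_category
-- ===== SOURCE A (Python) =====
-- SEASON_LABELS = ["FR", "SO", "JR", "SR", "RSO", "RJR", "RSR", "GR"]
--
-- META_SUFFIXES = {"college", "season"}
--
-- def get_stat_category(col):
--     """Extract (season_label, category) from a column name, or None."""
--     for label in SEASON_LABELS:
--         prefix = f"{label}_"
--         if col.startswith(prefix):
--             remainder = col[len(prefix):]
--             if remainder in META_SUFFIXES:
--                 return label, "__meta__"
--             cat = remainder.split("_")[0]
--             return label, cat
--     return None, None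
-- ===== SOURCE B (Python) =====
-- SEASON_LABELS = {"FR", "SO", "JR", "SR", "RSO", "RJR", "RSR", "GR"}
--
-- META_SUFFIXES = {"college", "season"}
--
-- def get_stat_category(col):
--     """Extract (season_label, category) from a column name, or None."""
--     head, sep, remainder = col.partition("_")
--     if not sep or head not in SEASON_LABELS:
--         return None, None
--     if remainder in META_SUFFIXES:
--         return head, "__meta__"
--     return head, remainder.split("_")[0]
-- ===== Notes on version B (the rewrite author's own statement) =====
-- stated objective: idiomatic
-- what changed: Replaces A's linear scan over the eight SEASON_LABELS prefixes with a single col.partition('_') parse followed by one set-membership lookup of the head.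
import Mathlib
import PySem

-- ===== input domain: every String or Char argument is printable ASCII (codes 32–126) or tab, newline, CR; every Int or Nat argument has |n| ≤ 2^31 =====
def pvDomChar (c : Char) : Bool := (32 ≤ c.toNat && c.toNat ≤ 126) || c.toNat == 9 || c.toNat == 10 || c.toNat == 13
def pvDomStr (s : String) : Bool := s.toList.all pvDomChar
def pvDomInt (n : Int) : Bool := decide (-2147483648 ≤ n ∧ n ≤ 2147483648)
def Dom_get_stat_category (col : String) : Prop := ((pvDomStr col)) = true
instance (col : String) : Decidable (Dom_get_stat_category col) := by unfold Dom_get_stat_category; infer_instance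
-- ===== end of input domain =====

-- B replaces A's linear scan over SEASON_LABELS prefixes by one partition('_') parse plus a set lookup (idiomatic; no speed claim).

-- ===== PORT A =====
-- SEASON_LABELS (module constant), as lists of chars
def pvLabels : List (List Char) :=
  [['F','R'], ['S','O'], ['J','R'], ['S','R'], ['R','S','O'], ['R','J','R'], ['R','S','R'], ['G','R']]

-- META_SUFFIXES (module constant, a Python set)
def pvMeta : PySem.Set (List Char) :=
  PySem.Set.ofList [['c','o','l','l','e','g','e'], ['s','e','a','s','o','n']]

-- the 'for label in SEASON_LABELS' loop of A, step for step
def getStatLoop : List (List Char) → List Char → Option (List Char) × Option (List Char)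
  | [], _ => (none, none)
  | label :: rest, col =>
    if PySem.Chars.startswith col (label ++ ['_']) then
      let remainder := PySem.Chars.slice col (some ((label.length + 1 : Nat) : Int)) none
      if PySem.Set.contains pvMeta remainder then
        (some label, some ['_','_','m','e','t','a','_','_'])
      else
        -- remainder.split("_")[0]; split with nonempty sep is never empty, so headD [] is exact
        (some label, some ((PySem.Chars.splitOn remainder ['_']).headD []))
    else getStatLoop rest col

def get_stat_category (col : String) : Option String × Option String :=
  match getStatLoop pvLabels col.toList with
  | (a, b) => (a.map String.mk, b.map String.mk)

-- ===== PORT B =====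
-- SEASON_LABELS as a Python set in B
def pvLabelSet : PySem.Set (List Char) := PySem.Set.ofList pvLabels

-- hand port of col.partition('_') for the one-char separator '_': exact
-- (head before first '_', flag whether a '_' was found, rest after it)
def partU : List Char → List Char × Bool × List Char
  | [] => ([], false, [])
  | c :: t =>
    if c = '_' then ([], true, t)
    else
      let p := partU t
      (c :: p.1, p.2.1, p.2.2)

def get_stat_category_alt (col : String) : Option String × Option String :=
  match partU col.toList with
  | (head, sep, remainder) =>
    if !sep || !(PySem.Set.contains pvLabelSet head) then (none, none)
    else if PySem.Set.contains pvMeta remainder then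
      (some (String.mk head), some "__meta__")
    else
      (some (String.mk head), some (String.mk ((PySem.Chars.splitOn remainder ['_']).headD [])))

-- ===== PRECONDITION & SPEC =====
def Spec_get_stat_category (col : String) (out : Option String × Option String) : Prop := out = get_stat_category_alt col
instance (col : String) (out : Option String × Option String) : Decidable (Spec_get_stat_category col out) := by unfold Spec_get_stat_category; infer_instance

-- ===== CLAIM (what is proved, stated in full; the proofs are below) =====
def Claim_equal_get_stat_category : Prop := ∀ (col : String), Dom_get_stat_category col → Spec_get_stat_category col (get_stat_category col)

-- ===== LEMMAS AND PROOFS =====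

-- partition's remainder is the drop past the head and the separator
lemma partU_drop (col : List Char) (h : (partU col).2.1 = true) :
    (partU col).2.2 = col.drop ((partU col).1.length + 1) := by
  induction col with
  | nil => simp [partU] at h
  | cons c t ih =>
    by_cases hc : c = '_'
    · simp [partU, hc]
    · simp [partU, hc] at h ⊢
      exact ih h

-- a '_'-free label followed by '_' is a prefix of col exactly when partition finds it as the head
lemma startswith_partU (label : List Char) (hl : '_' ∉ label) (col : List Char) :
    PySem.Chars.startswith col (label ++ ['_']) = true ↔
      partU col = (label, true, col.drop (label.length + 1)) := by
  induction label generalizing col with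
  | nil =>
    cases col with
    | nil => simp [PySem.Chars.startswith, partU]
    | cons c t =>
      by_cases hc : c = '_' <;>
        simp [PySem.Chars.startswith, partU, hc, List.isPrefixOf, eq_comm (a := '_')]
  | cons a as ih =>
    have ha : a ≠ '_' := by intro h; exact hl (h ▸ List.mem_cons_self)
    have has : '_' ∉ as := fun h => hl (List.mem_cons_of_mem _ h)
    cases col with
    | nil => simp [PySem.Chars.startswith, partU, List.isPrefixOf]
    | cons c t =>
      by_cases hc : c = '_'
      · subst hc
        simp [PySem.Chars.startswith, partU, List.isPrefixOf, ha]
      · by_cases hac : a = c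
        · subst hac
          have := ih has t
          simp only [PySem.Chars.startswith] at this
          simp [PySem.Chars.startswith, partU, hc, this, Prod.ext_iff]
        · simp [PySem.Chars.startswith, List.isPrefixOf, partU, hc, hac, Ne.symm hac]

-- A's loop, characterised through partition
lemma loop_spec (L : List (List Char)) (hL : ∀ l ∈ L, '_' ∉ l) (col : List Char) :
    getStatLoop L col =
      if (partU col).2.1 = true ∧ (partU col).1 ∈ L then
        (if PySem.Set.contains pvMeta (partU col).2.2 then
          (some (partU col).1, some ['_','_','m','e','t','a','_','_'])
        else
          (some (partU col).1, some ((PySem.Chars.splitOn (partU col).2.2 ['_']).headD [])))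
      else (none, none) := by
  induction L with
  | nil => simp [getStatLoop]
  | cons l L' ih =>
    have hl : '_' ∉ l := hL l List.mem_cons_self
    have hL' : ∀ x ∈ L', '_' ∉ x := fun x hx => hL x (List.mem_cons_of_mem _ hx)
    by_cases hs : PySem.Chars.startswith col (l ++ ['_']) = true
    · have hp := (startswith_partU l hl col).mp hs
      have hslice : PySem.Chars.slice col (some ((l.length + 1 : Nat) : Int)) none
          = col.drop (l.length + 1) := by
        rw [PySem.Chars.slice_eq_listSlice, PySem.List.slice_from col (by positivity)]
        simp
      simp only [getStatLoop, hs, if_true, hslice, hp]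
      simp
    · rw [getStatLoop]
      simp only [hs, Bool.false_eq_true, if_false]
      rw [ih hL']
      by_cases hsep : (partU col).2.1 = true
      · have hne : (partU col).1 ≠ l := by
          intro he
          apply hs
          rw [startswith_partU l hl col]
          have hd := partU_drop col hsep
          rw [← he]
          exact Prod.ext rfl (Prod.ext (by simpa using hsep) (by simpa using hd))
        simp [hsep, hne]
      · simp [hsep]

-- membership in the SEASON_LABELS set is membership in the label list
lemma contains_labelSet (h : List Char) :
    PySem.Set.contains pvLabelSet h = decide (h ∈ pvLabels) := by
  have : pvLabelSet = pvLabels := by decide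
  rw [this]
  simp [PySem.Set.contains]

-- ===== VERDICT (by name: the statement is the Claim_ definition above) =====
theorem get_stat_category_spec : Claim_equal_get_stat_category := by
  intro col _
  unfold Spec_get_stat_category get_stat_category get_stat_category_alt
  rw [loop_spec pvLabels (by decide) col.toList]
  rcases hp : partU col.toList with ⟨h, s, r⟩
  simp only [contains_labelSet]
  cases s
  · simp
  · by_cases hmem : h ∈ pvLabels
    · by_cases hmeta : r ∈ pvMeta
      · simp [hmem, hmeta]
        rfl
      · simp [hmem, hmeta]
    · simp [hmem]
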